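-- pv_equiv track=rewrite | github.com/wonjun6715/coding_test | 프로그래머스/unrated/181881. 조건에 맞게 수열 변환하기 2/조건에 맞게 수열 변환하기 2.py | solution
-- ===== SOURCE A (Python) =====
-- def solution(arr):
--     answer = []
--     cnt = 0
--     while True:
--         answer = arr.copy()
--         for i in range(len(arr)):
--             if arr[i] >= 50 and arr[i] % 2 == 0:
--                 arr[i] //= 2
--             elif arr[i] < 50 and arr[i] % 2 == 1:
--                 arr[i] = (arr[i]*2) + 1
--         cnt += 1
--         if answer == arr:
--             return cnt - 1
-- ===== SOURCE B (Python) =====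
-- def solution(arr):
--     best = 0
--     for i in range(len(arr)):
--         x = arr[i]
--         c = 0
--         while True:
--             if x >= 50 and x % 2 == 0:
--                 y = x // 2
--             elif x < 50 and x % 2 == 1:
--                 y = x * 2 + 1
--             else:
--                 y = x
--             if y == x:
--                 break
--             x = y
--             c += 1
--         arr[i] = x
--         best = max(best, c)
--     return best
-- ===== Notes on version B (the rewrite author's own statement) =====
-- stated objective: alternative
-- what changed: Replaces A's repeated synchronous whole-array passes (copy, transform every slot, compare until stable) by a single pass that stabilizes each element independently with an inner compute-until-fixed loop and returns the maximum per-element step count.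
import Mathlib
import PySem

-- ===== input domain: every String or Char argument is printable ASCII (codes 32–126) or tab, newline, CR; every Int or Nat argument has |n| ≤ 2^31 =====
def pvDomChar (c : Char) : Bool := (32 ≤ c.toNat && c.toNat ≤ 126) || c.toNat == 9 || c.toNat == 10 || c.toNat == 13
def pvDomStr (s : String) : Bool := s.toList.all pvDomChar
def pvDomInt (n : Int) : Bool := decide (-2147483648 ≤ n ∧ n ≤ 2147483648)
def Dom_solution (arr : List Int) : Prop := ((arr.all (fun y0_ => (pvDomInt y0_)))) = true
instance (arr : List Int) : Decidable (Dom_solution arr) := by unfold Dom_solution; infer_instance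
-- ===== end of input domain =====

-- B stabilizes each element independently instead of A's synchronous passes; both mutate arr
-- to the same stabilized state in Python (the theorems here are about the return value).

-- ===== PORT A =====
-- one synchronous pass: arr[i] is rewritten in place from its own old value only
def solPass (arr : List Int) : List Int :=
  arr.map (fun x =>
    if 50 ≤ x ∧ PySem.Int.mod x 2 = 0 then PySem.Int.floordiv x 2
    else if x < 50 ∧ PySem.Int.mod x 2 = 1 then x * 2 + 1
    else x)

-- the 'while True' loop (fuel-based; the fuel in `solution` suffices on Pre_-inputs)
def solLoop : Nat → List Int → Int → Int
  | 0, _, cnt => cnt - 1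
  | fuel + 1, arr, cnt =>
    let answer := arr
    let arr2 := solPass arr
    let cnt2 := cnt + 1
    if answer = arr2 then cnt2 - 1 else solLoop fuel arr2 cnt2

def solution (arr : List Int) : Int :=
  solLoop (101 + arr.foldl (fun a x => a + x.natAbs) 0) arr 0

-- ===== PORT B =====
-- inner while: transform x until unchanged, counting steps (fuel suffices on Pre_-inputs)
def stab : Nat → Int → Int → Int
  | 0, _, c => c
  | fuel + 1, x, c =>
    let y := if 50 ≤ x ∧ PySem.Int.mod x 2 = 0 then PySem.Int.floordiv x 2
             else if x < 50 ∧ PySem.Int.mod x 2 = 1 then x * 2 + 1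
             else x
    if y = x then c else stab fuel y (c + 1)

def solution_alt (arr : List Int) : Int :=
  arr.foldl (fun best x => max best (stab (101 + x.natAbs) x 0)) 0

-- ===== PRECONDITION & SPEC =====
-- Pre_ excludes lists containing an odd element below -1: there the transform 2x+1 decreases
-- forever and both A and B loop without returning.
def Pre_solution (arr : List Int) : Prop := ∀ x ∈ arr, x % 2 = 0 ∨ -1 ≤ x
instance (arr : List Int) : Decidable (Pre_solution arr) := by unfold Pre_solution; infer_instance
def pvWitness_solution : List Int := ([1, 60, -1, 0, 49])

def Spec_solution (arr : List Int) (out : Int) : Prop := out = solution_alt arr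
instance (arr : List Int) (out : Int) : Decidable (Spec_solution arr out) := by unfold Spec_solution; infer_instance

-- ===== CLAIM (what is proved, stated in full; the proofs are below) =====
def Claim_equal_solution : Prop := ∀ (arr : List Int), Dom_solution arr → Pre_solution arr → Spec_solution arr (solution arr)

-- ===== LEMMAS AND PROOFS =====

-- the one-element transform both ports apply
def f (x : Int) : Int :=
  if 50 ≤ x ∧ PySem.Int.mod x 2 = 0 then PySem.Int.floordiv x 2
  else if x < 50 ∧ PySem.Int.mod x 2 = 1 then x * 2 + 1
  else x

def good (x : Int) : Prop := x % 2 = 0 ∨ -1 ≤ x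

-- termination measure for one element
def mu (x : Int) : Nat := if f x = x then 0 else if 50 ≤ x then 100 + x.toNat else (50 - x).toNat

-- fueled per-element step count
def nsF : Nat → Int → Nat
  | 0, _ => 0
  | fuel + 1, x => if f x = x then 0 else nsF fuel (f x) + 1

def N (x : Int) : Nat := nsF (mu x + 1) x

def maxN (arr : List Int) : Nat := arr.foldl (fun b x => max b (N x)) 0

theorem f_cases (x : Int) :
    (50 ≤ x ∧ x % 2 = 0 ∧ x = 2 * f x) ∨
    (x < 50 ∧ x % 2 = 1 ∧ f x = x * 2 + 1) ∨ f x = x := by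
  unfold f
  rw [PySem.Int.mod_eq_emod_of_pos (by omega : (0:Int) < 2)]
  by_cases h1 : 50 ≤ x ∧ x % 2 = 0
  · left
    rw [if_pos h1, PySem.Int.floordiv_eq_ediv_of_pos (by omega)]
    exact ⟨h1.1, h1.2, by omega⟩
  · rw [if_neg h1]
    by_cases h2 : x < 50 ∧ x % 2 = 1
    · exact Or.inr (Or.inl ⟨h2.1, h2.2, by rw [if_pos h2]⟩)
    · exact Or.inr (Or.inr (by rw [if_neg h2]))

theorem good_step {x : Int} (hg : good x) : good (f x) := by
  rcases f_cases x with ⟨h1, h2, h3⟩ | ⟨h1, h2, h3⟩ | h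
  · right; omega
  · right; rcases hg with hg | hg <;> omega
  · rw [h]; exact hg

theorem mu_decreases {x : Int} (hg : good x) (hne : f x ≠ x) : mu (f x) < mu x := by
  rcases f_cases x with ⟨h1, h2, h3⟩ | ⟨h1, h2, h3⟩ | h
  · -- halving case: x = 2 * f x, 50 ≤ x
    unfold mu
    rw [if_neg hne]
    by_cases hfy : f (f x) = f x
    · rw [if_pos hfy]; split_ifs <;> omega
    · rw [if_neg hfy]; split_ifs <;> omega
  · -- doubling case: f x = 2x + 1, x < 50
    have hx1 : 1 ≤ x := by rcases hg with hg | hg <;> omega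
    unfold mu
    rw [if_neg hne]
    by_cases hfy : f (f x) = f x
    · rw [if_pos hfy]; split_ifs <;> omega
    · rw [if_neg hfy]
      have hlt : f x < 50 := by
        by_contra hge
        rcases f_cases (f x) with ⟨g1, g2, g3⟩ | ⟨g1, g2, g3⟩ | g
        · omega
        · omega
        · exact hfy g
      split_ifs <;> omega
  · exact absurd h hne

theorem N_zero_iff (x : Int) : N x = 0 ↔ f x = x := by
  unfold N nsF
  split_ifs with h <;> simp [h]

theorem nsF_fuel_inv {x : Int} (hg : good x) :
    ∀ {k k' : Nat}, mu x < k → mu x < k' → nsF k x = nsF k' x := by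
  have H : ∀ m : Nat, ∀ x : Int, good x → mu x ≤ m →
      ∀ k k' : Nat, mu x < k → mu x < k' → nsF k x = nsF k' x := by
    intro m
    induction m with
    | zero =>
      intro x hg hm k k' hk hk'
      obtain ⟨a, rfl⟩ : ∃ a, k = a + 1 := ⟨k - 1, by omega⟩
      obtain ⟨b, rfl⟩ : ∃ b, k' = b + 1 := ⟨k' - 1, by omega⟩
      by_cases hfx : f x = x
      · simp [nsF, hfx]
      · exact absurd (mu_decreases hg hfx) (by omega)
    | succ m ih =>
      intro x hg hm k k' hk hk'
      obtain ⟨a, rfl⟩ : ∃ a, k = a + 1 := ⟨k - 1, by omega⟩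
      obtain ⟨b, rfl⟩ : ∃ b, k' = b + 1 := ⟨k' - 1, by omega⟩
      by_cases hfx : f x = x
      · simp [nsF, hfx]
      · have hd := mu_decreases hg hfx
        have := ih (f x) (good_step hg) (by omega) a b (by omega) (by omega)
        simp [nsF, hfx, this]
  intro k k' hk hk'
  exact H (mu x) x hg le_rfl k k' hk hk'

theorem N_step {x : Int} (hg : good x) (hne : f x ≠ x) : N x = N (f x) + 1 := by
  have hd := mu_decreases hg hne
  have h1 : N x = if f x = x then 0 else nsF (mu x) (f x) + 1 := rfl
  rw [h1, if_neg hne,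
    nsF_fuel_inv (good_step hg) (k := mu x) (k' := mu (f x) + 1) hd (by omega)]
  rfl

theorem N_pred {x : Int} (hg : good x) : N (f x) = N x - 1 := by
  by_cases h : f x = x
  · rw [h, (N_zero_iff x).mpr h]
  · rw [N_step hg h]; omega

theorem N_le_mu {x : Int} (hg : good x) : N x ≤ mu x := by
  have H : ∀ m : Nat, ∀ x : Int, good x → mu x ≤ m → N x ≤ mu x := by
    intro m
    induction m with
    | zero =>
      intro x hg hm
      by_cases h : f x = x
      · rw [(N_zero_iff x).mpr h]; omega
      · exact absurd (mu_decreases hg h) (by omega)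
    | succ m ih =>
      intro x hg hm
      by_cases h : f x = x
      · rw [(N_zero_iff x).mpr h]; omega
      · have hd := mu_decreases hg h
        have := ih (f x) (good_step hg) (by omega)
        rw [N_step hg h]; omega
  exact H (mu x) x hg le_rfl

theorem mu_le (x : Int) : mu x ≤ 100 + x.natAbs := by
  unfold mu; split_ifs <;> omega

-- stab computes N
theorem stab_spec {x : Int} (hg : good x) :
    ∀ {k : Nat} {c : Int}, mu x < k → stab k x c = c + (N x : Int) := by
  have H : ∀ m : Nat, ∀ x : Int, good x → mu x ≤ m →
      ∀ k : Nat, ∀ c : Int, mu x < k → stab k x c = c + (N x : Int) := by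
    intro m
    induction m with
    | zero =>
      intro x hg hm k c hk
      obtain ⟨a, rfl⟩ : ∃ a, k = a + 1 := ⟨k - 1, by omega⟩
      by_cases hfx : f x = x
      · show (if f x = x then c else stab a (f x) (c + 1)) = _
        rw [if_pos hfx, (N_zero_iff x).mpr hfx]; simp
      · exact absurd (mu_decreases hg hfx) (by omega)
    | succ m ih =>
      intro x hg hm k c hk
      obtain ⟨a, rfl⟩ : ∃ a, k = a + 1 := ⟨k - 1, by omega⟩
      by_cases hfx : f x = x
      · show (if f x = x then c else stab a (f x) (c + 1)) = _
        rw [if_pos hfx, (N_zero_iff x).mpr hfx]; simp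
      · have hd := mu_decreases hg hfx
        show (if f x = x then c else stab a (f x) (c + 1)) = _
        rw [if_neg hfx, ih (f x) (good_step hg) (by omega) a (c + 1) (by omega),
            N_step hg hfx]
        push_cast; ring
  intro k c hk
  exact H (mu x) x hg le_rfl k c hk

theorem solPass_eq_map (arr : List Int) : solPass arr = arr.map f := rfl

theorem N_le_maxN {arr : List Int} {x : Int} (hx : x ∈ arr) : N x ≤ maxN arr := by
  have H : ∀ (l : List Int) (b : Nat), (x ∈ l → N x ≤ l.foldl (fun b x => max b (N x)) b)
      ∧ b ≤ l.foldl (fun b x => max b (N x)) b := by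
    intro l
    induction l with
    | nil => intro b; simp
    | cons h t ih =>
      intro b
      constructor
      · intro hm
        rcases List.mem_cons.mp hm with rfl | hm
        · simp only [List.foldl_cons]
          exact le_trans (le_max_right _ _) (ih (max b (N x))).2
        · exact (ih _).1 hm
      · simp only [List.foldl_cons]
        exact le_trans (le_max_left _ _) (ih _).2
  exact (H arr 0).1 hx

theorem maxN_zero {arr : List Int} (h : ∀ x ∈ arr, f x = x) : maxN arr = 0 := by
  have H : ∀ (l : List Int), (∀ x ∈ l, f x = x) → ∀ b, l.foldl (fun b x => max b (N x)) b = b := by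
    intro l
    induction l with
    | nil => intro _ b; rfl
    | cons a t ih =>
      intro hall b
      simp only [List.foldl_cons]
      rw [(N_zero_iff a).mpr (hall a (by simp)), Nat.max_zero]
      exact ih (fun x hx => hall x (by simp [hx])) b
  exact H arr h 0

theorem maxN_map_f {arr : List Int} (hg : ∀ x ∈ arr, good x) :
    maxN (arr.map f) = maxN arr - 1 := by
  have H : ∀ (l : List Int), (∀ x ∈ l, good x) → ∀ b : Nat,
      (l.map f).foldl (fun b x => max b (N x)) (b - 1) =
        l.foldl (fun b x => max b (N x)) b - 1 := by
    intro l
    induction l with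
    | nil => intro _ b; rfl
    | cons h t ih =>
      intro hall b
      simp only [List.map_cons, List.foldl_cons]
      rw [N_pred (hall h (by simp))]
      have : max (b - 1) (N h - 1) = max b (N h) - 1 := by omega
      rw [this, ih (fun x hx => hall x (by simp [hx]))]
  exact H arr hg 0

theorem map_f_eq_self_iff (arr : List Int) : arr.map f = arr ↔ ∀ x ∈ arr, f x = x := by
  induction arr with
  | nil => simp
  | cons h t ih => simp_all

theorem maxN_bound {arr : List Int} (hg : ∀ x ∈ arr, good x) :
    maxN arr < 101 + arr.foldl (fun a x => a + x.natAbs) 0 := by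
  have H : ∀ (l : List Int), (∀ x ∈ l, good x) → ∀ (b s : Nat), b ≤ 100 + s →
      l.foldl (fun b x => max b (N x)) b ≤ 100 + l.foldl (fun a x => a + x.natAbs) s := by
    intro l
    induction l with
    | nil => intro _ b s hb; simpa using hb
    | cons h t ih =>
      intro hall b s hb
      simp only [List.foldl_cons]
      apply ih (fun x hx => hall x (by simp [hx]))
      have h1 : N h ≤ 100 + h.natAbs :=
        le_trans (N_le_mu (hall h (by simp))) (mu_le h)
      omega
  have := H arr hg 0 0 (by omega)
  unfold maxN
  omega

theorem solLoop_spec {arr : List Int} (hg : ∀ x ∈ arr, good x) :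
    ∀ {k : Nat} {c : Int}, maxN arr < k → solLoop k arr c = c + (maxN arr : Int) := by
  have H : ∀ (k : Nat) (l : List Int) (c : Int), (∀ x ∈ l, good x) → maxN l < k →
      solLoop k l c = c + (maxN l : Int) := by
    intro k
    induction k with
    | zero => intro l c _ hk; omega
    | succ k ih =>
      intro l c hgl hk
      show (if l = solPass l then c + 1 - 1 else solLoop k (solPass l) (c + 1)) = _
      rw [solPass_eq_map]
      by_cases hfix : l.map f = l
      · rw [if_pos hfix.symm, maxN_zero ((map_f_eq_self_iff l).mp hfix)]
        simp
      · rw [if_neg (fun h => hfix h.symm)]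
        have hall : ∀ x ∈ l.map f, good x := by
          intro y hy
          rcases List.mem_map.mp hy with ⟨x, hx, rfl⟩
          exact good_step (hgl x hx)
        have hpos : 1 ≤ maxN l := by
          by_contra hc
          have h0 : ∀ x ∈ l, f x = x := fun x hx =>
            (N_zero_iff x).mp (by have := N_le_maxN hx; omega)
          exact hfix ((map_f_eq_self_iff l).mpr h0)
        have hm := maxN_map_f hgl
        rw [ih (l.map f) (c + 1) hall (by omega), hm]
        have : ((maxN l - 1 : Nat) : Int) = (maxN l : Int) - 1 := by omega
        rw [this]; ring
  intro k c hk
  exact H k arr c hg hk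

theorem alt_eq_maxN {arr : List Int} (hg : ∀ x ∈ arr, good x) :
    solution_alt arr = (maxN arr : Int) := by
  have H : ∀ (l : List Int), (∀ x ∈ l, good x) → ∀ b : Nat,
      l.foldl (fun best x => max best (stab (101 + x.natAbs) x 0)) ((b : Nat) : Int) =
        ((l.foldl (fun b x => max b (N x)) b : Nat) : Int) := by
    intro l
    induction l with
    | nil => intro _ b; rfl
    | cons h t ih =>
      intro hall b
      simp only [List.foldl_cons]
      have hgh : good h := hall h (by simp)
      have hfuel : mu h < 101 + h.natAbs := by have := mu_le h; omega
      rw [stab_spec hgh hfuel]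
      have : max ((b : Nat) : Int) (0 + (N h : Int)) = ((max b (N h) : Nat) : Int) := by
        push_cast; omega
      rw [this, ih (fun x hx => hall x (by simp [hx]))]
  have := H arr hg 0
  simpa [solution_alt, maxN] using this

-- ===== VERDICT (by name: the statement is the Claim_ definition above) =====
theorem solution_spec : Claim_equal_solution := by
  intro arr _ hpre
  have hg : ∀ x ∈ arr, good x := hpre
  show solution arr = solution_alt arr
  rw [solution, solLoop_spec hg (maxN_bound hg), alt_eq_maxN hg]
  ring
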